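-- pv_equiv track=rewrite | github.com/ksamuel/matching | backend/utils.py | highlight_absolute_differences
-- ===== SOURCE A (Python) =====
-- def highlight_absolute_differences(string1, string2):
--     if string1 == string2:
--         return string1, string2
--
--     res1 = []
--     res2 = []
--     for letter1, letter2 in zip(string1, string2):
--         if letter1 != letter2:
--             letter1 = f"<span class='text-blue-400'>{letter1}</span>"
--             letter2 = f"<span class='text-red-400'>{letter2}</span>"
--         res1.append(letter1)
--         res2.append(letter2)
--
--     return "".join(res1), "".join(res2)
-- ===== SOURCE B (Python) =====
-- def highlight_absolute_differences(string1, string2):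
--     # Run-segmentation: split the zipped pairs into maximal runs of equal /
--     # differing characters; copy equal runs wholesale as one chunk, wrap each
--     # character of a differing run.  No equal-strings special case needed.
--     out1, out2 = [], []
--     pairs = list(zip(string1, string2))
--     n = len(pairs)
--     i = 0
--     while i < n:
--         same = pairs[i][0] == pairs[i][1]
--         j = i
--         while j < n and (pairs[j][0] == pairs[j][1]) == same:
--             j += 1
--         run = pairs[i:j]
--         if same:
--             out1.append("".join(a for a, _ in run))
--             out2.append("".join(b for _, b in run))
--         else:
--             out1.extend(f"<span class='text-blue-400'>{a}</span>" for a, _ in run)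
--             out2.extend(f"<span class='text-red-400'>{b}</span>" for _, b in run)
--         i = j
--     return "".join(out1), "".join(out2)
-- ===== Notes on version B (the rewrite author's own statement) =====
-- stated objective: alternative
-- what changed: Replaced A's per-character zip loop (with its equal-strings early return) by run segmentation: the zipped pairs are split into maximal runs of equal/differing characters, equal runs are copied wholesale as a single chunk and only differing runs are rendered character by character; the equal-strings special case disappears because the whole input is then one equal run.
import Mathlib
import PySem

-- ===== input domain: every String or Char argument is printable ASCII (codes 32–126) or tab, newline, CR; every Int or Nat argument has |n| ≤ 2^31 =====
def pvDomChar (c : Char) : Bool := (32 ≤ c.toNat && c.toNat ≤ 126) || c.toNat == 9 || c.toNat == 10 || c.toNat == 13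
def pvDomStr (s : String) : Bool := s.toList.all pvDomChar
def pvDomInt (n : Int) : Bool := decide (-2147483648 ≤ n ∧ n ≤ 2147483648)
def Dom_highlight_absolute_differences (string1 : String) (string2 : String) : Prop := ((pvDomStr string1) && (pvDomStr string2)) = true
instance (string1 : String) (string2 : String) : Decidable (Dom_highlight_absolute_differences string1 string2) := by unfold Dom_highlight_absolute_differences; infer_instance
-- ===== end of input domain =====

-- B replaces A's per-character zip loop (and its equal-strings early return) by run
-- segmentation: maximal equal runs are copied wholesale as one chunk, differing runs
-- are wrapped character by character (objective: alternative).

-- the two HTML wrappers (shared literals of both programs)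
def pvBlue (c : Char) : List Char :=
  "<span class='text-blue-400'>".toList ++ [c] ++ "</span>".toList
def pvRed (c : Char) : List Char :=
  "<span class='text-red-400'>".toList ++ [c] ++ "</span>".toList

-- ===== PORT A =====
def highlight_absolute_differences (string1 : String) (string2 : String) : String × String :=
  if string1 == string2 then (string1, string2)
  else
    -- res1/res2 accumulated together over zip(string1, string2); "".join at the end
    let acc := (string1.toList.zip string2.toList).foldl
      (fun (r : List (List Char) × List (List Char)) p =>
        if p.1 ≠ p.2 then (r.1 ++ [pvBlue p.1], r.2 ++ [pvRed p.2])
        else (r.1 ++ [[p.1]], r.2 ++ [[p.2]]))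
      ([], [])
    (String.ofList (PySem.Chars.join [] acc.1), String.ofList (PySem.Chars.join [] acc.2))

-- ===== PORT B =====
-- inner while loop of Source B: length of the run starting at the current position
-- (the walking index i of Source B is transcribed as recursion on the suffix pairs[i:])
def pvRunLen (same : Bool) : List (Char × Char) → Nat
  | [] => 0
  | p :: ps => if (p.1 == p.2) == same then pvRunLen same ps + 1 else 0

-- outer while loop of Source B: consume one run per step, building the chunk lists
def pvRender : List (Char × Char) → List (List Char) × List (List Char)
  | [] => ([], [])
  | p :: ps =>
    let same := p.1 == p.2
    let k := pvRunLen same (p :: ps)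
    let run := (p :: ps).take k          -- pairs[i:j]
    let acc := pvRender ((p :: ps).drop k)   -- continue at i = j
    if same then ((run.map Prod.fst) :: acc.1, (run.map Prod.snd) :: acc.2)
    else ((run.map fun q => pvBlue q.1) ++ acc.1, (run.map fun q => pvRed q.2) ++ acc.2)
  termination_by l => l.length
  decreasing_by simp [pvRunLen, List.length_drop]

def highlight_absolute_differences_alt (string1 : String) (string2 : String) : String × String :=
  let acc := pvRender (string1.toList.zip string2.toList)
  (String.ofList (PySem.Chars.join [] acc.1), String.ofList (PySem.Chars.join [] acc.2))

-- ===== PRECONDITION & SPEC =====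
def Spec_highlight_absolute_differences (string1 : String) (string2 : String) (out : String × String) : Prop := out = highlight_absolute_differences_alt string1 string2
instance (string1 : String) (string2 : String) (out : String × String) : Decidable (Spec_highlight_absolute_differences string1 string2 out) := by unfold Spec_highlight_absolute_differences; infer_instance

-- ===== CLAIM (what is proved, stated in full; the proofs are below) =====
def Claim_equal_highlight_absolute_differences : Prop := ∀ (string1 : String) (string2 : String), Dom_highlight_absolute_differences string1 string2 → Spec_highlight_absolute_differences string1 string2 (highlight_absolute_differences string1 string2)

-- ===== LEMMAS AND PROOFS =====

-- the per-position renderers of A's loop body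
def pvF1 (p : Char × Char) : List Char := if p.1 ≠ p.2 then pvBlue p.1 else [p.1]
def pvF2 (p : Char × Char) : List Char := if p.1 ≠ p.2 then pvRed p.2 else [p.2]

-- "".join with empty separator is flatten
theorem pvJoinNil (l : List (List Char)) : PySem.Chars.join [] l = l.flatten := by
  induction l with
  | nil => simp [PySem.Chars.join_nil]
  | cons x t ih =>
    cases t with
    | nil => simp [PySem.Chars.join_singleton]
    | cons y t' => simpa [PySem.Chars.join_cons_cons] using ih

-- A's fold over the zip is the pair of maps
theorem pvFoldA (ps : List (Char × Char)) (r1 r2 : List (List Char)) :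
    ps.foldl
      (fun (r : List (List Char) × List (List Char)) p =>
        if p.1 ≠ p.2 then (r.1 ++ [pvBlue p.1], r.2 ++ [pvRed p.2])
        else (r.1 ++ [[p.1]], r.2 ++ [[p.2]])) (r1, r2)
    = (r1 ++ ps.map pvF1, r2 ++ ps.map pvF2) := by
  induction ps generalizing r1 r2 with
  | nil => simp
  | cons p ps ih =>
    rw [List.foldl_cons]
    by_cases h : p.1 = p.2
    · rw [if_neg (by simp [h]), ih]; simp [pvF1, pvF2, h]
    · rw [if_pos h, ih]; simp [pvF1, pvF2, h]

-- every pair in the leading run has equality flag `same`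
theorem pvRunLen_mem (same : Bool) (ps : List (Char × Char)) :
    ∀ q ∈ ps.take (pvRunLen same ps), (q.1 == q.2) = same := by
  induction ps with
  | nil => simp [pvRunLen]
  | cons p t ih =>
    by_cases h : (p.1 == p.2) = same
    · rw [pvRunLen, if_pos (by simp [h])]
      intro q hq
      rcases List.mem_cons.mp (by simpa using hq) with h1 | h1
      · simpa [h1] using h
      · exact ih q h1
    · rw [pvRunLen, if_neg (by simp [h])]; simp

-- run lemmas: a run of equal pairs flattens to the plain characters,
-- a run of differing pairs maps to the wrapped characters
theorem pvFlatEq1 (run : List (Char × Char)) (h : ∀ q ∈ run, q.1 = q.2) :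
    (run.map pvF1).flatten = run.map Prod.fst := by
  induction run with
  | nil => simp
  | cons q t ih =>
    have hq := h q (List.mem_cons_self ..)
    simp only [List.map_cons, List.flatten_cons, pvF1]
    rw [if_neg (not_not_intro hq), ih (fun r hr => h r (List.mem_cons_of_mem _ hr))]
    rfl

theorem pvFlatEq2 (run : List (Char × Char)) (h : ∀ q ∈ run, q.1 = q.2) :
    (run.map pvF2).flatten = run.map Prod.snd := by
  induction run with
  | nil => simp
  | cons q t ih =>
    have hq := h q (List.mem_cons_self ..)
    simp only [List.map_cons, List.flatten_cons, pvF2]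
    rw [if_neg (not_not_intro hq), ih (fun r hr => h r (List.mem_cons_of_mem _ hr))]
    rfl

theorem pvMapNe1 (run : List (Char × Char)) (h : ∀ q ∈ run, ¬ q.1 = q.2) :
    run.map (fun q => pvBlue q.1) = run.map pvF1 := by
  apply List.map_congr_left
  intro q hq
  simp [pvF1, h q hq]

theorem pvMapNe2 (run : List (Char × Char)) (h : ∀ q ∈ run, ¬ q.1 = q.2) :
    run.map (fun q => pvRed q.2) = run.map pvF2 := by
  apply List.map_congr_left
  intro q hq
  simp [pvF2, h q hq]

-- B's run-consuming recursion flattens to the per-position maps of A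
theorem pvRender_flat_aux (n : Nat) : ∀ ps : List (Char × Char), ps.length ≤ n →
    (pvRender ps).1.flatten = (ps.map pvF1).flatten ∧
    (pvRender ps).2.flatten = (ps.map pvF2).flatten := by
  induction n with
  | zero =>
    intro ps h
    have : ps = [] := List.eq_nil_of_length_eq_zero (Nat.le_zero.mp h)
    subst this; simp [pvRender]
  | succ n ih =>
    intro ps h
    match ps with
    | [] => simp [pvRender]
    | p :: ps' =>
      rw [pvRender]
      have hk : pvRunLen (p.1 == p.2) (p :: ps') = pvRunLen (p.1 == p.2) ps' + 1 := by
        simp [pvRunLen]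
      have hlen : ((p :: ps').drop (pvRunLen (p.1 == p.2) (p :: ps'))).length ≤ n := by
        simp only [List.length_drop, hk, List.length_cons] at *
        omega
      have ihd := ih _ hlen
      have hsplit : (p :: ps').take (pvRunLen (p.1 == p.2) (p :: ps'))
          ++ (p :: ps').drop (pvRunLen (p.1 == p.2) (p :: ps')) = p :: ps' :=
        List.take_append_drop _ _
      have hmem := pvRunLen_mem (p.1 == p.2) (p :: ps')
      set run := (p :: ps').take (pvRunLen (p.1 == p.2) (p :: ps')) with hrun
      set rest := (p :: ps').drop (pvRunLen (p.1 == p.2) (p :: ps')) with hrest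
      by_cases hs : p.1 = p.2
      · rw [if_pos (by simp [hs])]
        have hall : ∀ q ∈ run, q.1 = q.2 := by
          intro q hq
          have := hmem q hq
          rw [beq_iff_eq.mpr hs] at this
          exact eq_of_beq this
        constructor
        · conv_rhs => rw [← hsplit]
          simp only [List.map_append, List.flatten_append, List.flatten_cons, ihd.1,
            pvFlatEq1 run hall]
        · conv_rhs => rw [← hsplit]
          simp only [List.map_append, List.flatten_append, List.flatten_cons, ihd.2,
            pvFlatEq2 run hall]
      · rw [if_neg (by simp [hs])]
        have hall : ∀ q ∈ run, ¬ q.1 = q.2 := by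
          intro q hq he
          have := hmem q hq
          rw [beq_iff_eq.mpr he] at this
          exact hs (by simpa using this.symm)
        constructor
        · conv_rhs => rw [← hsplit]
          simp only [List.map_append, List.flatten_append, ihd.1, pvMapNe1 run hall]
        · conv_rhs => rw [← hsplit]
          simp only [List.map_append, List.flatten_append, ihd.2, pvMapNe2 run hall]

theorem pvRender_flat (ps : List (Char × Char)) :
    (pvRender ps).1.flatten = (ps.map pvF1).flatten ∧
    (pvRender ps).2.flatten = (ps.map pvF2).flatten :=
  pvRender_flat_aux ps.length ps le_rfl

-- B in closed form: both components as flattened maps over the zip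
theorem pvAltEq (string1 string2 : String) :
    highlight_absolute_differences_alt string1 string2
    = (String.ofList ((string1.toList.zip string2.toList).map pvF1).flatten,
       String.ofList ((string1.toList.zip string2.toList).map pvF2).flatten) := by
  unfold highlight_absolute_differences_alt
  dsimp only
  rw [pvJoinNil, pvJoinNil, (pvRender_flat _).1, (pvRender_flat _).2]

theorem pvFlatSingletons (l : List Char) : (List.map (fun c => [c]) l).flatten = l := by
  induction l with
  | nil => rfl
  | cons c t ih => simp [ih]

-- on equal strings the diff-free rendering reproduces the string
theorem pvJoinSelf (f : Char × Char → List Char) (hf : ∀ a : Char, f (a, a) = [a]) (l : List Char) :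
    ((l.zip l).map f).flatten = l := by
  have hz : l.zip l = l.map (fun c => (c, c)) := by
    induction l with
    | nil => rfl
    | cons c t ih => simpa [List.zip_cons_cons] using ih
  rw [hz, List.map_map]
  have hcomp : (f ∘ fun c => (c, c)) = fun c => [c] := by
    funext c; simp [hf]
  rw [hcomp]
  exact pvFlatSingletons l

-- ===== VERDICT (by name: the statement is the Claim_ definition above) =====
theorem highlight_absolute_differences_spec : Claim_equal_highlight_absolute_differences := by
  intro string1 string2 _
  unfold Spec_highlight_absolute_differences
  rw [pvAltEq]
  unfold highlight_absolute_differences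
  by_cases h : string1 = string2
  · subst h
    rw [if_pos (by simp)]
    rw [pvJoinSelf pvF1 (by intro a; simp [pvF1]),
        pvJoinSelf pvF2 (by intro a; simp [pvF2])]
    simp
  · rw [if_neg (by simpa using h)]
    rw [pvFoldA]
    simp [pvJoinNil]
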